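-- pv_equiv track=rewrite | github.com/SaarShai/Primes-Equispaced | experiments/BC_analytical_proof.py | mertens_sieve
-- ===== SOURCE A (Python) =====
-- def mertens_sieve(limit):
--     smallest_prime = [0] * (limit + 1)
--     for i in range(2, limit + 1):
--         if smallest_prime[i] == 0:
--             for j in range(i, limit + 1, i):
--                 if smallest_prime[j] == 0:
--                     smallest_prime[j] = i
--     mu = [0] * (limit + 1)
--     mu[1] = 1
--     for n in range(2, limit + 1):
--         p = smallest_prime[n]
--         if (n // p) % p == 0:
--             mu[n] = 0
--         else:
--             mu[n] = -mu[n // p]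
--     M = [0] * (limit + 1)
--     running = 0
--     for nn in range(1, limit + 1):
--         running += mu[nn]
--         M[nn] = running
--     return M, mu
-- ===== SOURCE B (Python) =====
-- def mertens_sieve(limit):
--     # Per-number trial division instead of a precomputed smallest-prime-factor sieve.
--     mu = [0] * (limit + 1)
--     mu[1] = 1
--     for n in range(2, limit + 1):
--         d = 2
--         while d * d <= n and n % d != 0:
--             d += 1
--         p = d if d * d <= n else n
--         m = n // p
--         mu[n] = 0 if m % p == 0 else -mu[m]
--     M = [0] * (limit + 1)
--     running = 0
--     for nn in range(1, limit + 1):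
--         running += mu[nn]
--         M[nn] = running
--     return M, mu
-- ===== Notes on version B (the rewrite author's own statement) =====
-- stated objective: alternative
-- what changed: Replaces the smallest-prime-factor sieve table (two nested sieve passes) with direct per-number trial division to find each n's smallest prime factor, feeding the same Moebius recurrence and prefix sum.
import Mathlib
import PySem

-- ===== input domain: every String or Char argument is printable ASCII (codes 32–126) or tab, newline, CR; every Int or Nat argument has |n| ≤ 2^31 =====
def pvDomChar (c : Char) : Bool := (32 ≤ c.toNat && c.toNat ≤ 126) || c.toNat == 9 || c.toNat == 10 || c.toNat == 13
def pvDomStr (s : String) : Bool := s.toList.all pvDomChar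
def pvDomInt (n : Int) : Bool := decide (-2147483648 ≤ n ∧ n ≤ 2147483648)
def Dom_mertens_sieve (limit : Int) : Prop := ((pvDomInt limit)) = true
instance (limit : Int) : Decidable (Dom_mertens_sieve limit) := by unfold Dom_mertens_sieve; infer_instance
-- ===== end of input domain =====

-- B replaces A's smallest-prime-factor sieve table with per-number trial division
-- feeding the same Moebius recurrence (objective: alternative algorithm, not faster).

-- ===== PORT A =====
-- inner loop: 'for j in range(i, limit+1, i): if smallest_prime[j] == 0: smallest_prime[j] = i'
def pvSpfInner (L i : Nat) (spf : List Nat) : List Nat :=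
  (List.range' i (L / i) i).foldl (fun s j => if s.getD j 0 = 0 then s.set j i else s) spf

-- outer loop building the smallest-prime table
def pvSpfBuild (L : Nat) : List Nat :=
  (List.range' 2 (L - 1)).foldl
    (fun s i => if s.getD i 0 = 0 then pvSpfInner L i s else s)
    (List.replicate (L + 1) 0)

-- 'for n in range(2, limit+1): p = smallest_prime[n]; …'
def pvMuBuildA (L : Nat) (spf : List Nat) : List Int :=
  (List.range' 2 (L - 1)).foldl
    (fun mu n =>
      let p := spf.getD n 0
      mu.set n (if (n / p) % p = 0 then 0 else -(mu.getD (n / p) 0)))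
    ((List.replicate (L + 1) (0 : Int)).set 1 1)

-- 'running = 0; for nn in range(1, limit+1): running += mu[nn]; M[nn] = running'
def pvMBuildA (L : Nat) (mu : List Int) : List Int :=
  ((List.range' 1 L).foldl
    (fun (st : List Int × Int) nn =>
      let r := st.2 + mu.getD nn 0
      (st.1.set nn r, r))
    (List.replicate (L + 1) (0 : Int), 0)).1

def mertens_sieve (limit : Int) : List Int × List Int :=
  let L := limit.toNat
  let spf := pvSpfBuild L
  let mu := pvMuBuildA L spf
  (pvMBuildA L mu, mu)

-- ===== PORT B =====
-- 'd = 2; while d*d <= n and n % d != 0: d += 1; p = d if d*d <= n else n'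
def pvSmallestDiv (n d : Nat) : Nat :=
  if n < d * d then n
  else if n % d = 0 then d
  else pvSmallestDiv n (d + 1)
termination_by n + 1 - d
decreasing_by
  have hdd : d * d ≤ n := by omega
  have : d ≤ n := by
    rcases Nat.eq_zero_or_pos d with h | h
    · omega
    · calc d = d * 1 := (Nat.mul_one d).symm
        _ ≤ d * d := Nat.mul_le_mul_left d h
        _ ≤ n := hdd
  omega

-- 'for n in range(2, limit+1): trial-divide n, then the Moebius recurrence'
def pvMuBuildB (L : Nat) : List Int :=
  (List.range' 2 (L - 1)).foldl
    (fun mu n =>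
      let p := pvSmallestDiv n 2
      let m := n / p
      mu.set n (if m % p = 0 then 0 else -(mu.getD m 0)))
    ((List.replicate (L + 1) (0 : Int)).set 1 1)

-- B's prefix-sum loop (same code as A's final loop, transcribed for B)
def pvMBuildB (L : Nat) (mu : List Int) : List Int :=
  ((List.range' 1 L).foldl
    (fun (st : List Int × Int) nn =>
      let r := st.2 + mu.getD nn 0
      (st.1.set nn r, r))
    (List.replicate (L + 1) (0 : Int), 0)).1

def mertens_sieve_alt (limit : Int) : List Int × List Int :=
  let L := limit.toNat
  let mu := pvMuBuildB L
  (pvMBuildB L mu, mu)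

-- ===== PRECONDITION & SPEC =====
-- A (and B) raises IndexError from the 'mu[1] = 1' initialisation on every nonpositive limit; Pre_ excludes exactly those inputs.
def Pre_mertens_sieve (limit : Int) : Prop := 1 ≤ limit
instance (limit : Int) : Decidable (Pre_mertens_sieve limit) := by unfold Pre_mertens_sieve; infer_instance
def pvWitness_mertens_sieve : Int := (5)

def Spec_mertens_sieve (limit : Int) (out : List Int × List Int) : Prop := out = mertens_sieve_alt limit
instance (limit : Int) (out : List Int × List Int) : Decidable (Spec_mertens_sieve limit out) := by unfold Spec_mertens_sieve; infer_instance

-- ===== CLAIM (what is proved, stated in full; the proofs are below) =====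
def Claim_equal_mertens_sieve : Prop := ∀ (limit : Int), Dom_mertens_sieve limit → Pre_mertens_sieve limit → Spec_mertens_sieve limit (mertens_sieve limit)

-- ===== LEMMAS AND PROOFS =====

theorem pvSmallestDiv_eq_minFac :
    ∀ n d, 2 ≤ n → 2 ≤ d → (∀ e, 2 ≤ e → e < d → ¬ e ∣ n) → pvSmallestDiv n d = n.minFac := by
  intro n d
  induction d using pvSmallestDiv.induct (n := n) with
  | case1 d hlt =>
    intro hn hd he
    rw [pvSmallestDiv, if_pos hlt]
    have hmd : n.minFac ∣ n := Nat.minFac_dvd n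
    have hm2 : 2 ≤ n.minFac := (Nat.minFac_prime (by omega)).two_le
    have hml : n.minFac ≤ n := Nat.minFac_le (by omega)
    have hdm : d ≤ n.minFac := by
      by_contra h
      exact he n.minFac hm2 (by omega) hmd
    obtain ⟨q, hq⟩ := hmd
    have hq1 : q = 1 := by
      rcases Nat.lt_or_ge q 2 with h | h
      · interval_cases q <;> omega
      · exfalso
        have hqd : n.minFac ≤ q := Nat.minFac_le_of_dvd h ⟨n.minFac, hq.trans (Nat.mul_comm _ _)⟩
        nlinarith
    simp only [hq1, Nat.mul_one] at hq
    omega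
  | case2 d hlt hmod =>
    intro hn hd he
    rw [pvSmallestDiv, if_neg hlt, if_pos hmod]
    have hdvd : d ∣ n := Nat.dvd_of_mod_eq_zero hmod
    have h1 : n.minFac ≤ d := Nat.minFac_le_of_dvd hd hdvd
    have h2 : d ≤ n.minFac := by
      by_contra h
      exact he n.minFac (Nat.minFac_prime (by omega)).two_le (by omega) (Nat.minFac_dvd n)
    omega
  | case3 d hlt hmod ih =>
    intro hn hd he
    rw [pvSmallestDiv, if_neg hlt, if_neg hmod]
    refine ih hn (by omega) ?_
    intro e h2e hed hdv
    rcases Nat.lt_or_ge e d with h | h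
    · exact he e h2e h hdv
    · have : e = d := by omega
      subst this
      exact hmod (Nat.mod_eq_zero_of_dvd hdv)

theorem getD_set' (l : List Nat) (i j v : Nat) :
    (l.set i v).getD j 0 = if i = j ∧ i < l.length then v else l.getD j 0 := by
  rcases eq_or_ne i j with rfl|h
  · by_cases hl : i < l.length <;> simp [List.getD, hl]
  · simp [List.getD, h]

-- generic: fold of "set to v if currently 0" over an index list
theorem foldl_setIfZero (v : Nat) (hv : v ≠ 0) (js : List Nat) (s : List Nat) (j : Nat) :
    ((js.foldl (fun s j => if s.getD j 0 = 0 then s.set j v else s) s).getD j 0) =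
      if j ∈ js ∧ s.getD j 0 = 0 ∧ j < s.length then v else s.getD j 0 := by
  induction js generalizing s with
  | nil => simp
  | cons j0 rest ih =>
    simp only [List.foldl_cons]
    by_cases h0 : s.getD j0 0 = 0
    · rw [if_pos h0, ih, List.length_set, getD_set']
      by_cases hj : j0 = j
      · subst hj
        by_cases hl : j0 < s.length
        · have h0' : s[j0] = 0 := by rwa [List.getD_eq_getElem s 0 hl] at h0
          simp [hv, h0', hl]
        · simp [hl]
      · simp only [if_neg (by tauto : ¬(j0 = j ∧ j0 < s.length))]
        have hj' : ¬ j = j0 := fun h => hj h.symm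
        simp [hj']
    · rw [if_neg h0, ih]
      by_cases hj : j = j0
      · subst hj
        simp only [List.getD] at h0
        simp [h0]
      · simp [hj]

theorem foldl_setIfZero_length (v : Nat) (js : List Nat) (s : List Nat) :
    (js.foldl (fun s j => if s.getD j 0 = 0 then s.set j v else s) s).length = s.length := by
  induction js generalizing s with
  | nil => rfl
  | cons j0 rest ih =>
    simp only [List.foldl_cons]
    rw [ih]
    split <;> simp

theorem mem_range'_mul (L i j : Nat) (hi : 1 ≤ i) :
    j ∈ List.range' i (L / i) i ↔ i ∣ j ∧ i ≤ j ∧ j ≤ L := by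
  rw [List.mem_range']
  constructor
  · rintro ⟨t, ht, rfl⟩
    refine ⟨⟨t + 1, by ring⟩, by omega, ?_⟩
    have h1 : t + 1 ≤ L / i := by omega
    have h2 : (t + 1) * i ≤ L := (Nat.le_div_iff_mul_le (by omega)).mp h1
    have h3 : (t + 1) * i = i + i * t := by ring
    omega
  · rintro ⟨⟨q, rfl⟩, hij, hjL⟩
    have hq0 : q ≠ 0 := by rintro rfl; simp at hij; omega
    obtain ⟨t, rfl⟩ : ∃ t, q = t + 1 := ⟨q - 1, by omega⟩
    refine ⟨t, ?_, by ring⟩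
    have h1 : t + 1 ≤ L / i :=
      (Nat.le_div_iff_mul_le (by omega)).mpr (by rw [Nat.mul_comm]; exact hjL)
    omega

theorem pvSpfInner_getD (L i : Nat) (hi : 1 ≤ i) (s : List Nat) (hs : s.length = L + 1) (j : Nat) :
    (pvSpfInner L i s).getD j 0 =
      if i ∣ j ∧ i ≤ j ∧ j ≤ L ∧ s.getD j 0 = 0 then i else s.getD j 0 := by
  unfold pvSpfInner
  rw [foldl_setIfZero i (by omega)]
  simp only [mem_range'_mul L i j hi]
  by_cases h : i ∣ j ∧ i ≤ j ∧ j ≤ L ∧ s.getD j 0 = 0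
  · rw [if_pos ⟨⟨h.1, h.2.1, h.2.2.1⟩, h.2.2.2, by omega⟩, if_pos h]
  · rw [if_neg (fun hc => h ⟨hc.1.1, hc.1.2.1, hc.1.2.2, hc.2.1⟩), if_neg h]

theorem pvSpfInner_length (L i : Nat) (s : List Nat) :
    (pvSpfInner L i s).length = s.length := by
  unfold pvSpfInner; exact foldl_setIfZero_length _ _ _

def pvInv (L k : Nat) (s : List Nat) : Prop :=
  s.length = L + 1 ∧
  ∀ j, j ≤ L → s.getD j 0 = if 2 ≤ j ∧ j.minFac ≤ k then j.minFac else 0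

theorem pvMinFac_two_le (j : Nat) (h : 2 ≤ j) : 2 ≤ j.minFac :=
  (Nat.minFac_prime (by omega)).two_le

theorem pvOuter_step (L k : Nat) (hk : 1 ≤ k) (hkL : k + 1 ≤ L) (s : List Nat)
    (h : pvInv L k s) :
    pvInv L (k + 1) (if s.getD (k + 1) 0 = 0 then pvSpfInner L (k + 1) s else s) := by
  obtain ⟨hlen, hval⟩ := h
  have hi2 : 2 ≤ k + 1 := by omega
  have hgi := hval (k + 1) hkL
  by_cases hA : (k + 1).minFac ≤ k
  · -- k+1 already has a recorded factor: nothing changes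
    have hne : s.getD (k + 1) 0 ≠ 0 := by
      rw [hgi, if_pos ⟨hi2, hA⟩]
      have := pvMinFac_two_le (k + 1) hi2
      omega
    rw [if_neg hne]
    refine ⟨hlen, fun j hj => ?_⟩
    rw [hval j hj]
    by_cases hc : 2 ≤ j ∧ j.minFac ≤ k
    · rw [if_pos hc, if_pos ⟨hc.1, by omega⟩]
    · rw [if_neg hc, if_neg ?_]
      rintro ⟨h2j, hk1⟩
      have heq : j.minFac = k + 1 := by
        rcases Nat.lt_or_ge j.minFac (k + 1) with h | h
        · exact absurd ⟨h2j, by omega⟩ hc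
        · omega
      -- then minFac (k+1) = k+1 since minFac j is prime
      have hp : (j.minFac).Prime := Nat.minFac_prime (by omega)
      rw [heq] at hp
      have : (k + 1).minFac = k + 1 := Nat.Prime.minFac_eq hp
      omega
  · -- k+1 is fresh: the inner loop stamps all its new multiples
    have hz : s.getD (k + 1) 0 = 0 := by
      rw [hgi, if_neg (fun hc => hA hc.2)]
    rw [if_pos hz]
    have hmf : (k + 1).minFac = k + 1 := by
      have h1 := Nat.minFac_le (show 0 < k + 1 by omega)
      omega
    refine ⟨by rw [pvSpfInner_length, hlen], fun j hj => ?_⟩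
    rw [pvSpfInner_getD L (k + 1) (by omega) s hlen j]
    by_cases hc : (k + 1) ∣ j ∧ k + 1 ≤ j ∧ s.getD j 0 = 0
    · rw [if_pos ⟨hc.1, hc.2.1, hj, hc.2.2⟩]
      have h2j : 2 ≤ j := by omega
      have hub : j.minFac ≤ k + 1 := Nat.minFac_le_of_dvd hi2 hc.1
      have hlb : ¬ j.minFac ≤ k := by
        intro hle
        have := hval j hj
        rw [if_pos ⟨h2j, hle⟩] at this
        rw [this] at hc
        have := pvMinFac_two_le j h2j
        omega
      rw [if_pos ⟨h2j, hub⟩]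
      omega
    · rw [if_neg (fun hcc => hc ⟨hcc.1, hcc.2.1, hcc.2.2.2⟩)]
      rw [hval j hj]
      by_cases hd : 2 ≤ j ∧ j.minFac ≤ k
      · rw [if_pos hd, if_pos ⟨hd.1, by omega⟩]
      · rw [if_neg hd, if_neg ?_]
        rintro ⟨h2j, hk1⟩
        have heq : j.minFac = k + 1 := by
          rcases Nat.lt_or_ge j.minFac (k + 1) with h | h
          · exact absurd ⟨h2j, by omega⟩ hd
          · omega
        apply hc
        refine ⟨heq ▸ Nat.minFac_dvd j, heq ▸ Nat.minFac_le (by omega), ?_⟩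
        rw [hval j hj, if_neg (fun hcc => by omega)]

theorem pvOuter_fold (L : Nat) :
    ∀ m k s, 1 ≤ k → k + m ≤ L → pvInv L k s →
      pvInv L (k + m)
        ((List.range' (k + 1) m).foldl
          (fun s i => if s.getD i 0 = 0 then pvSpfInner L i s else s) s) := by
  intro m
  induction m with
  | zero => intro k s _ _ h; simpa using h
  | succ m ih =>
    intro k s hk hkL h
    rw [List.range'_succ, List.foldl_cons]
    have h1 := pvOuter_step L k hk (by omega) s h
    have := ih (k + 1) _ (by omega) (by omega) h1
    simpa [Nat.add_assoc, Nat.add_comm 1 m] using this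

theorem pvSpfBuild_getD (L : Nat) (n : Nat) (h2 : 2 ≤ n) (hL : n ≤ L) :
    (pvSpfBuild L).getD n 0 = n.minFac := by
  have h0 : pvInv L 1 (List.replicate (L + 1) 0) := by
    refine ⟨by simp, fun j hj => ?_⟩
    rw [if_neg ?_]
    · simp only [List.getD, List.getElem?_replicate]
      split <;> rfl
    · rintro ⟨h2j, hm⟩
      have := pvMinFac_two_le j h2j
      omega
  have := pvOuter_fold L (L - 1) 1 (List.replicate (L + 1) 0) (by omega) (by omega) h0
  unfold pvSpfBuild
  have hLL : 1 + (L - 1) = L := by omega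
  rw [hLL] at this
  rw [(this.2 n hL), if_pos ⟨h2, Nat.minFac_le (by omega) |>.trans hL⟩]

theorem muBuild_eq (L : Nat) : pvMuBuildA L (pvSpfBuild L) = pvMuBuildB L := by
  unfold pvMuBuildA pvMuBuildB
  apply PySem.List.foldl_congr_mem
  intro mu n hn
  rw [List.mem_range'_1] at hn
  have h2 : 2 ≤ n := hn.1
  have hL : n ≤ L := by omega
  simp only [pvSpfBuild_getD L n h2 hL,
    pvSmallestDiv_eq_minFac n 2 h2 le_rfl (fun e he hlt => by omega)]

-- ===== VERDICT (by name: the statement is the Claim_ definition above) =====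
theorem mertens_sieve_spec : Claim_equal_mertens_sieve := by
  intro limit _ _
  show _ = _
  simp only [mertens_sieve, mertens_sieve_alt, muBuild_eq]
  rfl
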